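-- pv_equiv track=rewrite | github.com/MoXiaobai1412/author-skill | scripts/schema_manager.py | _remove_column_from_desc
-- ===== SOURCE A (Python) =====
-- def _remove_column_from_desc(content, col_name):
--     """从 desc 中移除列"""
--     lines = content.split('\n')
--     in_desc = False
--
--     new_lines = []
--     for line in lines:
--         if line.startswith("## desc"):
--             in_desc = True
--         elif line.startswith("## "):
--             in_desc = False
--
--         if in_desc and line.startswith("| ") and f"| {col_name} |" in line:
--             continue  # 跳过要删除的列
--
--         new_lines.append(line)
--
--     return "\n".join(new_lines)
-- ===== SOURCE B (Python) =====
-- def _remove_column_from_desc(content, col_name):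
--     """Section-based rewrite: group lines into header-led sections, filter only desc sections."""
--     lines = content.split('\n')
--     needle = f"| {col_name} |"
--     out = []
--     i = 0
--     # prelude: lines before the first '## ' header are kept verbatim
--     while i < len(lines) and not lines[i].startswith("## "):
--         out.append(lines[i])
--         i += 1
--     # each section: a header line plus its body (lines until the next header)
--     while i < len(lines):
--         header = lines[i]
--         i += 1
--         body = []
--         while i < len(lines) and not lines[i].startswith("## "):
--             body.append(lines[i])
--             i += 1
--         if header.startswith("## desc"):
--             body = [l for l in body if not (l.startswith("| ") and needle in l)]
--         out.append(header)
--         out.extend(body)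
--     return "\n".join(out)
-- ===== Notes on version B (the rewrite author's own statement) =====
-- stated objective: alternative
-- what changed: Replaces A's per-line in_desc flag loop by an explicit two-phase section decomposition: lines are grouped into a prelude plus header-led sections, and only the bodies of '## desc' sections are filtered; the flag variable disappears.
import Mathlib
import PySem

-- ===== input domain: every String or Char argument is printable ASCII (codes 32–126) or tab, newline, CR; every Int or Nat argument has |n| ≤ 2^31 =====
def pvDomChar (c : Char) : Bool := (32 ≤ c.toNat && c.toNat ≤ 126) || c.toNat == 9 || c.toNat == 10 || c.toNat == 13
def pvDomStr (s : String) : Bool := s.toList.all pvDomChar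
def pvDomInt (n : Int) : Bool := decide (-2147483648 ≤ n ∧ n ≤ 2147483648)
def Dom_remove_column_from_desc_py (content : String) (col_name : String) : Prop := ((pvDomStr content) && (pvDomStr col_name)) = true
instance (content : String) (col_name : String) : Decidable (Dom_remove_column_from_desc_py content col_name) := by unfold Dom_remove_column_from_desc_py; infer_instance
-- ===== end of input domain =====

-- ===== PORT A =====
-- A: single pass with an in_desc flag; drops matching '| ...' rows while the flag is set.
-- the loop body of A's for-loop, on the loop state (in_desc, new_lines)
def pvStepA (col_name : String) (s : Bool × List String) (line : String) : Bool × List String :=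
  let in_desc := if PySem.Str.startswith line "## desc" then true
                 else if PySem.Str.startswith line "## " then false
                 else s.1
  if in_desc && (PySem.Str.startswith line "| " &&
      PySem.Str.isIn ("| " ++ col_name ++ " |") line)
  then (in_desc, s.2)
  else (in_desc, s.2 ++ [line])

def remove_column_from_desc_py (content : String) (col_name : String) : String :=
  -- content.split('\n'): the separator is the nonempty literal, so split? is always some — exact
  let lines := (PySem.Str.split? content "\n").getD []
  let res := lines.foldl (pvStepA col_name) (false, [])
  PySem.Str.join "\n" res.2

-- ===== PORT B =====
-- B (alternative decomposition): group lines into a prelude plus header-led sections;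
-- filter only the bodies of '## desc' sections, keep everything else verbatim.

-- mirrors Source B's inner while loop: collect lines until the next '## ' header
def pvCollectBody : List String → List String × List String
  | [] => ([], [])
  | l :: rest =>
    if PySem.Str.startswith l "## " then ([], l :: rest)
    else
      let p := pvCollectBody rest
      (l :: p.1, p.2)

theorem pvCollectBody_len : ∀ (ls : List String), (pvCollectBody ls).2.length ≤ ls.length := by
  intro ls
  induction ls with
  | nil => simp [pvCollectBody]
  | cons l rest ih =>
    simp only [pvCollectBody]
    split
    · simp
    · simp only [List.length_cons]
      exact Nat.le_succ_of_le ih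

def pvKeep (needle : String) (l : String) : Bool :=
  !(PySem.Str.startswith l "| " && PySem.Str.isIn needle l)

-- mirrors Source B's outer while loop over sections
def pvSections (needle : String) : List String → List String
  | [] => []
  | h :: rest =>
    let p := pvCollectBody rest
    let body := if PySem.Str.startswith h "## desc" then p.1.filter (pvKeep needle) else p.1
    (h :: body) ++ pvSections needle p.2
termination_by ls => ls.length
decreasing_by
  simp only [List.length_cons]
  exact Nat.lt_succ_of_le (pvCollectBody_len rest)

def remove_column_from_desc_py_alt (content : String) (col_name : String) : String :=
  -- content.split('\n'): the separator is the nonempty literal, so split? is always some — exact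
  let lines := (PySem.Str.split? content "\n").getD []
  let needle := "| " ++ col_name ++ " |"
  let p := pvCollectBody lines
  PySem.Str.join "\n" (p.1 ++ pvSections needle p.2)

-- ===== PRECONDITION & SPEC =====
def Spec_remove_column_from_desc_py (content : String) (col_name : String) (out : String) : Prop := out = remove_column_from_desc_py_alt content col_name
instance (content : String) (col_name : String) (out : String) : Decidable (Spec_remove_column_from_desc_py content col_name out) := by unfold Spec_remove_column_from_desc_py; infer_instance

-- ===== CLAIM (what is proved, stated in full; the proofs are below) =====
def Claim_equal_remove_column_from_desc_py : Prop := ∀ (content : String) (col_name : String), Dom_remove_column_from_desc_py content col_name → Spec_remove_column_from_desc_py content col_name (remove_column_from_desc_py content col_name)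

-- ===== LEMMAS AND PROOFS =====

-- proof-only recursion mirroring A's loop body (flag in, kept lines out)
def pvAGo (needle : String) : List String → Bool → List String
  | [], _ => []
  | l :: rest, d =>
    let d' := if PySem.Str.startswith l "## desc" then true
              else if PySem.Str.startswith l "## " then false
              else d
    if d' && (PySem.Str.startswith l "| " && PySem.Str.isIn needle l)
    then pvAGo needle rest d'
    else l :: pvAGo needle rest d'

theorem pvFoldA (col_name : String) : ∀ (lines : List String) (d : Bool) (acc : List String),
    (lines.foldl (pvStepA col_name) (d, acc)).2
      = acc ++ pvAGo ("| " ++ col_name ++ " |") lines d := by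
  intro lines
  induction lines with
  | nil => intro d acc; simp [pvAGo]
  | cons l rest ih =>
    intro d acc
    rw [List.foldl_cons]
    by_cases hd : PySem.Str.startswith l "## desc" = true
    · by_cases hc : (PySem.Str.startswith l "| " &&
          PySem.Str.isIn ("| " ++ col_name ++ " |") l) = true
      · have hs : pvStepA col_name (d, acc) l = (true, acc) := by
          simp only [pvStepA, hd, hc]; simp
        rw [hs, ih]
        simp only [pvAGo, hd, hc]; simp
      · simp only [Bool.not_eq_true] at hc
        have hs : pvStepA col_name (d, acc) l = (true, acc ++ [l]) := by
          simp only [pvStepA, hd, hc]; simp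
        rw [hs, ih]
        simp only [pvAGo, hd, hc]; simp
    · simp only [Bool.not_eq_true] at hd
      by_cases hh : PySem.Str.startswith l "## " = true
      · have hs : pvStepA col_name (d, acc) l = (false, acc ++ [l]) := by
          simp only [pvStepA, hd, hh]; simp
        rw [hs, ih]
        simp only [pvAGo, hd, hh]; simp
      · simp only [Bool.not_eq_true] at hh
        cases d with
        | false =>
          have hs : pvStepA col_name (false, acc) l = (false, acc ++ [l]) := by
            simp only [pvStepA, hd, hh]; simp
          rw [hs, ih]
          simp only [pvAGo, hd, hh]; simp
        | true =>
          by_cases hc : (PySem.Str.startswith l "| " &&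
              PySem.Str.isIn ("| " ++ col_name ++ " |") l) = true
          · have hs : pvStepA col_name (true, acc) l = (true, acc) := by
              simp only [pvStepA, hd, hh, hc]; simp
            rw [hs, ih]
            simp only [pvAGo, hd, hh, hc]; simp
          · simp only [Bool.not_eq_true] at hc
            have hs : pvStepA col_name (true, acc) l = (true, acc ++ [l]) := by
              simp only [pvStepA, hd, hh, hc]; simp
            rw [hs, ih]
            simp only [pvAGo, hd, hh, hc]; simp

theorem pv_desc_imp_header (l : String) :
    PySem.Str.startswith l "## desc" = true → PySem.Str.startswith l "## " = true := by
  intro h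
  rw [PySem.Str.startswith_eq] at *
  rw [PySem.Chars.startswith_iff] at *
  exact List.IsPrefix.trans (by decide) h

theorem pv_header_not_pipe (l : String) :
    PySem.Str.startswith l "## " = true → PySem.Str.startswith l "| " = false := by
  intro h
  rw [PySem.Str.startswith_eq, PySem.Chars.startswith_iff] at h
  rw [PySem.Str.startswith_eq]
  rw [Bool.eq_false_iff]
  intro hp
  rw [PySem.Chars.startswith_iff] at hp
  obtain ⟨t, ht⟩ := h
  obtain ⟨t', ht'⟩ := hp
  rw [← ht'] at ht
  simp at ht

theorem pvMain (needle : String) : ∀ (n : Nat) (ls : List String) (d : Bool), ls.length ≤ n →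
    pvAGo needle ls d =
      (if d then (pvCollectBody ls).1.filter (pvKeep needle) else (pvCollectBody ls).1)
        ++ pvSections needle (pvCollectBody ls).2 := by
  intro n
  induction n with
  | zero =>
    intro ls d h
    have : ls = [] := by cases ls <;> simp_all
    subst this
    rw [pvSections.eq_def]
    simp only [pvAGo, pvCollectBody]; simp
  | succ n ih =>
    intro ls d h
    cases ls with
    | nil =>
      rw [pvSections.eq_def]
      simp only [pvAGo, pvCollectBody]; simp
    | cons l rest =>
      by_cases hh : PySem.Str.startswith l "## " = true
      · -- header line: starts a new section
        have hp : PySem.Str.startswith l "| " = false := pv_header_not_pipe l hh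
        by_cases hd : PySem.Str.startswith l "## desc" = true
        · simp only [pvAGo, pvCollectBody, hh, hd, hp, if_pos,
            Bool.false_and, Bool.and_false, if_neg (Bool.false_ne_true)]
          rw [pvSections.eq_def]
          simp only [hd, if_pos]
          rw [ih rest true (by simpa using Nat.le_of_succ_le_succ h)]
          simp
        · replace hd : PySem.Str.startswith l "## desc" = false := by
            simpa using hd
          simp only [pvAGo, pvCollectBody, hh, hd, hp, if_true, if_false,
            Bool.false_and, Bool.and_false, Bool.false_eq_true]
          rw [pvSections.eq_def]
          simp only [hd, Bool.false_eq_true, if_false]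
          rw [ih rest false (by simpa using Nat.le_of_succ_le_succ h)]
          simp
      · -- non-header line: flag unchanged
        replace hh : PySem.Str.startswith l "## " = false := by simpa using hh
        have hd : PySem.Str.startswith l "## desc" = false := by
          rcases Bool.eq_false_or_eq_true (PySem.Str.startswith l "## desc") with h' | h'
          · rw [pv_desc_imp_header l h'] at hh; cases hh
          · exact h'
        have h' : rest.length ≤ n := by simpa using Nat.le_of_succ_le_succ h
        by_cases hk : (PySem.Str.startswith l "| " && PySem.Str.isIn needle l) = true
        · have hk' : pvKeep needle l = false := by simp only [pvKeep, hk]; simp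
          cases d with
          | false =>
            simp only [pvAGo, pvCollectBody, hh, hd, hk]; simp
            exact (ih rest false h').trans (by simp)
          | true =>
            simp only [pvAGo, pvCollectBody, hh, hd, hk]; simp [hk']
            exact (ih rest true h').trans (by simp)
        · replace hk : (PySem.Str.startswith l "| " && PySem.Str.isIn needle l) = false := by
            simpa using hk
          have hk' : pvKeep needle l = true := by simp only [pvKeep, hk]; simp
          cases d with
          | false =>
            simp only [pvAGo, pvCollectBody, hh, hd, hk]; simp
            exact (ih rest false h').trans (by simp)
          | true =>
            simp only [pvAGo, pvCollectBody, hh, hd, hk]; simp [hk']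
            exact (ih rest true h').trans (by simp)

-- ===== VERDICT (by name: the statement is the Claim_ definition above) =====
theorem remove_column_from_desc_py_spec : Claim_equal_remove_column_from_desc_py := by
  unfold Claim_equal_remove_column_from_desc_py
  intro content col_name _
  unfold Spec_remove_column_from_desc_py
  unfold remove_column_from_desc_py remove_column_from_desc_py_alt
  simp only
  rw [pvFoldA]
  rw [pvMain ("| " ++ col_name ++ " |") ((PySem.Str.split? content "\n").getD []).length _ false le_rfl]
  simp
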